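-- pv_equiv track=rewrite | github.com/llegregam/MSReader | ms_reader/extract.py | _check_if_std
-- ===== SOURCE A (Python) =====
-- def _check_if_std(c12_compounds, c13_compounds):
--     """
--     Get list of missing standards in the IDMS (13C) signals. If none, do
--     nothing and return 12C compounds list as is. Else, remove the missing
--     metabolites from the list of 12C compounds to drop them from data
--     after.
--
--     :param c12_compounds: list of all the 12C compound names in data
--     :param c13_compounds: list of all the 13C compound names in data
--     :return: list of 12C compounds minus the removed compounds and list
--              of the compounds missing from IDMS
--     """
--
--     trunc_c13 = [std[:-4] for std in c13_compounds]
--     missing_std = [x for x in c12_compounds if x not in trunc_c13]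
--     if missing_std:
--         for x in missing_std:
--             c12_compounds.remove(x)
--         return c12_compounds, missing_std
--     else:
--         return c12_compounds, None
-- ===== SOURCE B (Python) =====
-- def _check_if_std(c12_compounds, c13_compounds):
--     # One partitioning pass over c12_compounds against a prebuilt set of
--     # truncated 13C names; mutates c12_compounds in place (slice assignment)
--     # exactly as A's repeated .remove() loop does.
--     trunc_c13 = {std[:-4] for std in c13_compounds}
--     kept = []
--     missing = []
--     for x in c12_compounds:
--         if x in trunc_c13:
--             kept.append(x)
--         else:
--             missing.append(x)
--     if missing:
--         c12_compounds[:] = kept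
--         return c12_compounds, missing
--     return c12_compounds, None
-- ===== Notes on version B (the rewrite author's own statement) =====
-- stated objective: faster
-- what changed: Replaces A's membership-filter followed by a loop of list.remove calls with a single partitioning pass (kept/missing) against a prebuilt set of truncated names, then one slice assignment instead of repeated removals.
import Mathlib
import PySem

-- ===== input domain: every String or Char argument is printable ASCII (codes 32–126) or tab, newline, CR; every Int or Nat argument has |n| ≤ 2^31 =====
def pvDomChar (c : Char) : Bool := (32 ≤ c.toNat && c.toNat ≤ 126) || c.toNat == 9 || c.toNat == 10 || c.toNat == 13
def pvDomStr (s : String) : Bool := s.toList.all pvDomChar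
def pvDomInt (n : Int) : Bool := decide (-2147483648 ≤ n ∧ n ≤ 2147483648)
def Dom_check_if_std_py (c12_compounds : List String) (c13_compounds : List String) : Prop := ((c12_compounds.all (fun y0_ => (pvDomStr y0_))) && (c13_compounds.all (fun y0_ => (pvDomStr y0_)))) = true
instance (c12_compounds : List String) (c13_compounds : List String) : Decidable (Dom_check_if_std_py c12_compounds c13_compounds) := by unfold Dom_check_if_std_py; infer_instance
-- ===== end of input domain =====

-- B replaces A's filter + repeated list.remove loop by one partitioning pass plus
-- slice assignment; both mutate c12_compounds in place to the same final list, and the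
-- theorem below is about the return value.


-- ===== PORT A =====
def check_if_std_py (c12_compounds : List String) (c13_compounds : List String) : List String × Option (List String) :=
  -- trunc_c13 = [std[:-4] for std in c13_compounds]
  let trunc_c13 := c13_compounds.map (fun std => PySem.Str.slice std none (some (-4)))
  -- missing_std = [x for x in c12_compounds if x not in trunc_c13]
  let missing_std := c12_compounds.filter (fun x => !(trunc_c13.contains x))
  if missing_std ≠ [] then
    -- for x in missing_std: c12_compounds.remove(x)  — x is always present, so
    -- remove? never returns none here and .getD is exact (ValueError unreachable)
    let c12' := missing_std.foldl (fun acc x => (PySem.List.remove? acc x).getD acc) c12_compounds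
    (c12', some missing_std)
  else
    (c12_compounds, none)

-- ===== PORT B =====
def check_if_std_py_alt (c12_compounds : List String) (c13_compounds : List String) : List String × Option (List String) :=
  let trunc_c13 := PySem.Set.ofList (c13_compounds.map (fun std => PySem.Str.slice std none (some (-4))))
  let p := c12_compounds.foldl
    (fun (acc : List String × List String) x =>
      if PySem.Set.contains trunc_c13 x then (acc.1 ++ [x], acc.2) else (acc.1, acc.2 ++ [x]))
    ([], [])
  if p.2 ≠ [] then (p.1, some p.2) else (c12_compounds, none)

-- ===== PRECONDITION & SPEC =====
def Spec_check_if_std_py (c12_compounds : List String) (c13_compounds : List String) (out : List String × Option (List String)) : Prop := out = check_if_std_py_alt c12_compounds c13_compounds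
instance (c12_compounds : List String) (c13_compounds : List String) (out : List String × Option (List String)) : Decidable (Spec_check_if_std_py c12_compounds c13_compounds out) := by unfold Spec_check_if_std_py; infer_instance

-- ===== CLAIM (what is proved, stated in full; the proofs are below) =====
def Claim_equal_check_if_std_py : Prop := ∀ (c12_compounds : List String) (c13_compounds : List String), Dom_check_if_std_py c12_compounds c13_compounds → Spec_check_if_std_py c12_compounds c13_compounds (check_if_std_py c12_compounds c13_compounds)

-- ===== LEMMAS AND PROOFS =====

-- B's partitioning fold computes the two filters, appended to the accumulators.
theorem foldl_partition {α : Type} (p : α → Bool) (l : List α) (a b : List α) :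
    l.foldl (fun (acc : List α × List α) x =>
      if p x then (acc.1 ++ [x], acc.2) else (acc.1, acc.2 ++ [x])) (a, b)
    = (a ++ l.filter p, b ++ l.filter (fun x => !p x)) := by
  induction l generalizing a b with
  | nil => simp
  | cons x xs ih =>
    by_cases h : p x = true
    · simp [List.foldl_cons, h, ih]
    · simp only [Bool.not_eq_true] at h
      simp [List.foldl_cons, h, ih]

-- erasing elements that all differ from the head commutes with cons
theorem foldl_erase_cons {α : Type} [DecidableEq α] (p : α → Bool) (x : α) (l m : List α)
    (hx : p x = false) (hm : ∀ y ∈ m, p y = true) :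
    m.foldl (fun acc y => acc.erase y) (x :: l)
    = x :: m.foldl (fun acc y => acc.erase y) l := by
  induction m generalizing l with
  | nil => rfl
  | cons y ys ih =>
    have hy : p y = true := hm y (by simp)
    have hxy : x ≠ y := by intro h; rw [h, hy] at hx; cases hx
    rw [List.foldl_cons, List.foldl_cons, List.erase_cons, if_neg (by simpa using hxy)]
    exact ih (l.erase y) (fun z hz => hm z (by simp [hz]))

-- removing, one by one, every element of l that fails p leaves the elements satisfying p
theorem foldl_erase_filter {α : Type} [DecidableEq α] (p : α → Bool) (l : List α) :
    (l.filter (fun x => !p x)).foldl (fun acc y => acc.erase y) l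
    = l.filter p := by
  induction l with
  | nil => rfl
  | cons x xs ih =>
    by_cases h : p x = true
    · simp only [List.filter_cons, h, Bool.not_true, Bool.false_eq_true, if_true, if_false]
      rw [foldl_erase_cons (fun y => !p y) x xs (xs.filter (fun y => !p y))
            (by simp [h]) (by intro y hy; simpa using List.of_mem_filter hy), ih]
    · simp only [Bool.not_eq_true] at h
      simp only [List.filter_cons, h, Bool.not_false, Bool.false_eq_true, if_true, if_false]
      rw [List.foldl_cons, List.erase_cons_head, ih]

-- A's remove loop: every removed element is present, so remove? is erase
theorem foldl_removeD_eq_foldl_erase {α : Type} [DecidableEq α] [BEq α] [LawfulBEq α]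
    (m : List α) (l : List α) :
    m.foldl (fun acc x => (PySem.List.remove? acc x).getD acc) l
    = m.foldl (fun acc x => acc.erase x) l := by
  induction m generalizing l with
  | nil => rfl
  | cons y ys ih =>
    rw [List.foldl_cons, List.foldl_cons]
    by_cases hy : y ∈ l
    · rw [PySem.List.remove?_eq_some_erase _ _ hy, Option.getD_some, ih]
    · rw [(PySem.List.remove?_eq_none_iff _ _).mpr hy, Option.getD_none,
          List.erase_of_not_mem hy, ih]

-- ===== VERDICT (by name: the statement is the Claim_ definition above) =====
theorem check_if_std_py_spec : Claim_equal_check_if_std_py := by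
  intro c12 c13 _
  show check_if_std_py c12 c13 = check_if_std_py_alt c12 c13
  rw [check_if_std_py, check_if_std_py_alt]
  have ht : ∀ x : String,
      PySem.Set.contains
        (PySem.Set.ofList (c13.map (fun std => PySem.Str.slice std none (some (-4))))) x
      = (c13.map (fun std => PySem.Str.slice std none (some (-4)))).contains x := by
    intro x
    simp [PySem.Set.contains, PySem.Set.mem_ofList]
  rw [foldl_partition]
  rw [List.filter_congr (fun x _ => ht x),
      List.filter_congr (fun x _ => congrArg Bool.not (ht x)),
      List.nil_append, List.nil_append]
  split_ifs with h
  · rw [foldl_removeD_eq_foldl_erase, foldl_erase_filter]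
  · rfl
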